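-- pv_equiv track=rewrite | github.com/nimitjainFireLab/JainEtAl_T7rnaReplication | Fig_S11/agreementByVariant_20180426_ver4.py | getSecondHalf
-- ===== SOURCE A (Python) =====
-- def getSecondHalf(dictData):
--     dictToReturn={}
--     for eachEl in dictData:
--         if eachEl[1] in dictToReturn:
--             dictToReturn[eachEl[1]]+=dictData[eachEl]
--         else:
--             dictToReturn[eachEl[1]]=dictData[eachEl]
--     return dictToReturn
-- ===== SOURCE B (Python) =====
-- def getSecondHalf(dictData):
--     seconds = list(dict.fromkeys(k[1] for k in dictData))
--     return {s: sum(v for k, v in dictData.items() if k[1] == s) for s in seconds}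
-- ===== Notes on version B (the rewrite author's own statement) =====
-- stated objective: alternative
-- what changed: Replaced the single hash-aggregation pass (insert-or-accumulate into a dict while iterating) by a two-phase decomposition: first an ordered dedup of the second key components (dict.fromkeys), then one comprehension per distinct component that scans the dict and sums the matching values.
import Mathlib
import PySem

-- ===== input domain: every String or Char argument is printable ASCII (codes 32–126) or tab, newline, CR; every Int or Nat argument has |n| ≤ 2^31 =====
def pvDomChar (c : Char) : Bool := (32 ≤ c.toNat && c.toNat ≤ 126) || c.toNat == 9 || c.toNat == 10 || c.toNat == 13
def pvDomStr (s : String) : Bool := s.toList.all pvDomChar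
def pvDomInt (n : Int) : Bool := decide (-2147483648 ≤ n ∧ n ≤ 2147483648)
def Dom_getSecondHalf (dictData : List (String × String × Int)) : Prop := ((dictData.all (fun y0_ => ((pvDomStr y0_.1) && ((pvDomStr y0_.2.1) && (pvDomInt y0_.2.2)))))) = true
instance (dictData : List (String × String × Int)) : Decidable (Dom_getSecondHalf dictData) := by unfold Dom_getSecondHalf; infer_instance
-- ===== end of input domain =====

-- B replaces A's single hash-aggregation pass by an ordered dedup of the second key
-- components followed by one scan-and-sum per distinct component (objective: alternative).


-- ===== PORT A =====
-- dictData[eachEl]: first-match lookup of the key (e.1, e.2.1) in the association list.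
-- The key is always present (eachEl iterates dictData's keys), so the [] case is unreachable; 0 is a dummy.
def pvLookupA (l : List (String × String × Int)) (k : String × String) : Int :=
  match l with
  | [] => 0
  | (a, b, n) :: rest => if a = k.1 ∧ b = k.2 then n else pvLookupA rest k

def getSecondHalf (dictData : List (String × String × Int)) : List (String × Int) :=
  (dictData.foldl (fun d e =>
      if d.contains e.2.1 then
        d.modify e.2.1 0 (fun cur => cur + pvLookupA dictData (e.1, e.2.1))
      else
        d.insert e.2.1 (pvLookupA dictData (e.1, e.2.1)))
    PySem.Dict.empty).items

-- ===== PORT B =====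
def getSecondHalf_alt (dictData : List (String × String × Int)) : List (String × Int) :=
  (PySem.List.dedup (dictData.map (fun e => e.2.1))).map
    (fun s => (s, ((dictData.filter (fun e => e.2.1 == s)).map (fun e => e.2.2)).sum))

-- ===== PRECONDITION & SPEC =====
-- Pre_ excludes association lists carrying the same (first, second) key twice: a Python dict
-- cannot hold duplicate keys, so such lists represent no input of the Python function.
def Pre_getSecondHalf (dictData : List (String × String × Int)) : Prop :=
  (dictData.map (fun e => (e.1, e.2.1))).Nodup
instance (dictData : List (String × String × Int)) : Decidable (Pre_getSecondHalf dictData) := by unfold Pre_getSecondHalf; infer_instance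

def pvWitness_getSecondHalf : (List (String × String × Int)) :=
  [("a", "x", 1), ("b", "x", 2), ("c", "y", 3)]

def Spec_getSecondHalf (dictData : List (String × String × Int)) (out : List (String × Int)) : Prop := out = getSecondHalf_alt dictData
instance (dictData : List (String × String × Int)) (out : List (String × Int)) : Decidable (Spec_getSecondHalf dictData out) := by unfold Spec_getSecondHalf; infer_instance

-- ===== CLAIM (what is proved, stated in full; the proofs are below) =====
def Claim_equal_getSecondHalf : Prop := ∀ (dictData : List (String × String × Int)), Dom_getSecondHalf dictData → Pre_getSecondHalf dictData → Spec_getSecondHalf dictData (getSecondHalf dictData)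

-- ===== LEMMAS AND PROOFS =====

-- The same aggregation loop, but each step uses the entry's own value instead of the lookup.
def pvStepSelf (d : PySem.Dict String Int) (e : String × String × Int) : PySem.Dict String Int :=
  if d.contains e.2.1 then d.modify e.2.1 0 (fun cur => cur + e.2.2)
  else d.insert e.2.1 e.2.2

-- With distinct keys, the first-match lookup of an entry's key returns that entry's value.
theorem pvLookupA_self (l : List (String × String × Int))
    (h : (l.map (fun e => (e.1, e.2.1))).Nodup) :
    ∀ e ∈ l, pvLookupA l (e.1, e.2.1) = e.2.2 := by
  induction l with
  | nil => intro e he; cases he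
  | cons hd tl ih =>
    obtain ⟨a, b, n⟩ := hd
    intro e he
    simp only [List.map_cons, List.nodup_cons, List.mem_map] at h
    rw [List.mem_cons] at he
    rcases he with he | he
    · subst he; simp [pvLookupA]
    · simp only [pvLookupA]
      split
      · next hab =>
        exfalso
        exact h.1 ⟨e, he, by simp [hab.1.symm, hab.2.symm]⟩
      · exact ih h.2 e he

-- Invariant: the self-value aggregation loop's items are exactly B's dedup-then-sum list.
theorem pvFold_items (l : List (String × String × Int)) :
    (l.foldl pvStepSelf PySem.Dict.empty).items =
      (PySem.List.dedup (l.map (fun e => e.2.1))).map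
        (fun s => (s, ((l.filter (fun e => e.2.1 == s)).map (fun e => e.2.2)).sum)) := by
  induction l using List.reverseRecOn with
  | nil => simp [PySem.List.dedup, PySem.Set.ofList, PySem.Dict.empty]
  | append_singleton l e ih =>
    have hkeys : (l.foldl pvStepSelf PySem.Dict.empty).keys =
        PySem.List.dedup (l.map (fun e => e.2.1)) := by
      simp only [PySem.Dict.keys, ih, List.map_map]
      simp [Function.comp_def]
    have hnodup : (l.foldl pvStepSelf PySem.Dict.empty).keys.Nodup := by
      rw [hkeys]; exact PySem.Set.nodup_ofList _
    have hcont : (l.foldl pvStepSelf PySem.Dict.empty).contains e.2.1 =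
        decide (e.2.1 ∈ l.map (fun e => e.2.1)) := by
      rw [PySem.Dict.contains_eq_decide_mem_keys, hkeys]
      simp [PySem.List.dedup, PySem.Set.mem_ofList]
    rw [List.foldl_append, List.foldl_cons, List.foldl_nil]
    simp only [List.map_append, List.map_cons, List.map_nil, PySem.List.dedup,
      PySem.Set.ofList_append_singleton, List.filter_append, List.filter_cons,
      List.filter_nil, List.sum_append]
    by_cases hm : e.2.1 ∈ l.map (fun x => x.2.1)
    · -- key already seen: the entry is updated in place
      have hc : (l.foldl pvStepSelf PySem.Dict.empty).contains e.2.1 = true := by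
        rw [hcont]; simpa using hm
      have hmem : e.2.1 ∈ PySem.Set.ofList (l.map (fun x => x.2.1)) :=
        (PySem.Set.mem_ofList _ _).mpr hm
      have hgetD : (l.foldl pvStepSelf PySem.Dict.empty).getD e.2.1 0 =
          ((l.filter (fun x => x.2.1 == e.2.1)).map (fun x => x.2.2)).sum := by
        apply PySem.Dict.getD_of_mem_items _ _ hnodup
        rw [ih]
        exact List.mem_map_of_mem (by simpa [PySem.List.dedup] using hmem)
      simp only [pvStepSelf, hc, if_pos, PySem.Dict.modify, hgetD]
      rw [PySem.Dict.items_insert_of_contains _ _ hc, ih, List.map_map,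
        PySem.Set.add_of_mem hmem]
      apply List.map_congr_left
      intro t _
      by_cases ht : t = e.2.1
      · subst ht; simp
      · simp [Function.comp, ht, Ne.symm ht]
    · -- fresh key: a new entry is appended at the end
      have hc : (l.foldl pvStepSelf PySem.Dict.empty).contains e.2.1 = false := by
        rw [hcont]; simpa using hm
      have hmem : e.2.1 ∉ PySem.Set.ofList (l.map (fun x => x.2.1)) := by
        rw [PySem.Set.mem_ofList]; exact hm
      simp only [pvStepSelf, hc, Bool.false_eq_true, if_false]
      rw [PySem.Dict.items_insert_of_not_contains _ _ hc, ih,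
        PySem.Set.add_of_not_mem hmem, List.map_append]
      congr 1
      · apply List.map_congr_left
        intro t htmem
        have ht : e.2.1 ≠ t := by
          intro hEq; exact hmem (by rwa [hEq])
        simp [ht]
      · have hfil : l.filter (fun x => x.2.1 == e.2.1) = [] := by
          rw [List.filter_eq_nil_iff]
          intro x hx hEq
          have hx21 : x.2.1 = e.2.1 := by simpa using hEq
          exact hm (hx21 ▸ List.mem_map_of_mem hx)
        simp [hfil]

-- ===== VERDICT (by name: the statement is the Claim_ definition above) =====
theorem getSecondHalf_spec : Claim_equal_getSecondHalf := by
  intro dictData _ hpre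
  unfold Spec_getSecondHalf getSecondHalf getSecondHalf_alt
  rw [PySem.List.foldl_congr_mem _ _ pvStepSelf _ (by
    intro acc x hx
    have hv := pvLookupA_self dictData hpre x hx
    simp only [pvStepSelf, hv])]
  exact pvFold_items dictData
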